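-- pv_equiv track=rewrite | github.com/zhxl0903/CSCD94_VESPCN | Tools/LayersCalculator.py | getOutputDim
-- ===== SOURCE A (Python) =====
-- import math
--
-- def computeOutDim(i, k, p, s):
--     return(math.floor((i - k + 2*p)/s) + 1)
--
-- def getOutputDim(h):
--
--     ls = []
--     for i in range(3):
--         for j in range(3):
--             for k in range(3):
--                 for l in range(3):
--                     for m in range(3):
--
--                         cl1h =  computeOutDim(h, 5, i, 2)
--                         cl2h = computeOutDim(cl1h, 3, j, 1)
--                         cl3h = computeOutDim(cl2h, 3, k, 1)
--                         cl4h = computeOutDim(cl3h, 3, l, 1)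
--                         cl5h = computeOutDim(cl4h, 3, m, 1)
--
--                         if cl5h == h/2:
--                             ls.append((i,j,k,l,m))
--     return ls
-- ===== SOURCE B (Python) =====
-- def getOutputDim(h):
--     # Odd h can never match: every cl5h is an integer while h/2 is not.
--     if h % 2:
--         return []
--     ls = []
--     target = h // 2
--     for i in range(3):
--         # layer 1: cl1h = floor((h - 5 + 2i)/2) + 1; layers 2-5 are linear: out = in + 2p - 2,
--         # so cl5h = cl1h + 2*(j+k+l+m) - 8, and we need 2*(j+k+l+m) == target - cl1h + 8 =: d
--         cl1h = (h - 5 + 2 * i) // 2 + 1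
--         d = target - cl1h + 8
--         if d % 2 == 0 and 0 <= d <= 16:
--             s = d // 2
--             for n in range(81):  # (j,k,l,m) in lexicographic order, base-3 decode
--                 j, r = divmod(n, 27)
--                 k, r = divmod(r, 9)
--                 l, m = divmod(r, 3)
--                 if j + k + l + m == s:
--                     ls.append((i, j, k, l, m))
--     return ls
-- ===== Notes on version B (the rewrite author's own statement) =====
-- stated objective: alternative
-- what changed: Instead of recomputing all five layer heights for each padding combination and comparing to h/2, B rejects odd h outright, and per first-layer padding i solves the linear relation cl5h = cl1h + 2*(j+k+l+m) - 8 for the required inner padding sum, then enumerates the inner padding tuples by base-3 decoding of a single counter, keeping those with that sum.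
import Mathlib
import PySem

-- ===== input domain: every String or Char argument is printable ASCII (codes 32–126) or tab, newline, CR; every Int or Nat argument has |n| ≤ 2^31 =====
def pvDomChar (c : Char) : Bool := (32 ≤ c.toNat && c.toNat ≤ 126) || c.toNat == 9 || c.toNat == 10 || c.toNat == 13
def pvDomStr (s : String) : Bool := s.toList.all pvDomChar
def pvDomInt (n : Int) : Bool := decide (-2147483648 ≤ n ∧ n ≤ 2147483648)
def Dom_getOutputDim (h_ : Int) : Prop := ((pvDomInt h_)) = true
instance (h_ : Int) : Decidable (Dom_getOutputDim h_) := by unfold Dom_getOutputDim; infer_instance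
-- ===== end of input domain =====

-- B replaces A's per-combination five-layer dim recomputation by an early odd-h rejection plus, per
-- first-layer padding i, a solved linear target for the inner padding sum and one base-3-decoded
-- counter loop over the inner padding tuples (objective: alternative).

-- ===== PORT A =====
def computeOutDim (i k p s : Int) : Int :=
  -- math.floor((i - k + 2*p)/s) + 1; the float division is exact on |values| ≤ 2^31 < 2^53,
  -- so the floor equals Python's integer floor division
  PySem.Int.floordiv (i - k + 2*p) s + 1

def getOutputDim (h_ : Int) : List (Int × Int × Int × Int × Int) :=
  (PySem.List.pyRange 0 3 1).foldl (fun ls i =>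
    (PySem.List.pyRange 0 3 1).foldl (fun ls j =>
      (PySem.List.pyRange 0 3 1).foldl (fun ls k =>
        (PySem.List.pyRange 0 3 1).foldl (fun ls l =>
          (PySem.List.pyRange 0 3 1).foldl (fun ls m =>
            let cl1h := computeOutDim h_ 5 i 2
            let cl2h := computeOutDim cl1h 3 j 1
            let cl3h := computeOutDim cl2h 3 k 1
            let cl4h := computeOutDim cl3h 3 l 1
            let cl5h := computeOutDim cl4h 3 m 1
            -- `cl5h == h/2` compares an int with the float h/2, exact on |h_| ≤ 2^31 < 2^53:
            -- it holds iff h_ is even and cl5h = h_ // 2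
            if PySem.Int.mod h_ 2 == 0 && cl5h == PySem.Int.floordiv h_ 2 then
              ls ++ [(i, j, k, l, m)]
            else ls) ls) ls) ls) ls) []

-- ===== PORT B =====
def getOutputDim_alt (h_ : Int) : List (Int × Int × Int × Int × Int) :=
  if PySem.Int.mod h_ 2 ≠ 0 then []   -- `if h % 2: return []`
  else
    let target := PySem.Int.floordiv h_ 2
    (PySem.List.pyRange 0 3 1).foldl (fun ls i =>
      let cl1h := PySem.Int.floordiv (h_ - 5 + 2*i) 2 + 1
      let d := target - cl1h + 8
      if PySem.Int.mod d 2 == 0 && (decide (0 ≤ d) && decide (d ≤ 16)) then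
        let s := PySem.Int.floordiv d 2
        (PySem.List.pyRange 0 81 1).foldl (fun ls n =>
          let j := PySem.Int.floordiv n 27
          let r := PySem.Int.mod n 27
          let k := PySem.Int.floordiv r 9
          let r2 := PySem.Int.mod r 9
          let l := PySem.Int.floordiv r2 3
          let m := PySem.Int.mod r2 3
          if j + k + l + m == s then ls ++ [(i, j, k, l, m)] else ls) ls
      else ls) []

-- ===== PRECONDITION & SPEC =====
def Spec_getOutputDim (h_ : Int) (out : List (Int × Int × Int × Int × Int)) : Prop := out = getOutputDim_alt h_
instance (h_ : Int) (out : List (Int × Int × Int × Int × Int)) : Decidable (Spec_getOutputDim h_ out) := by unfold Spec_getOutputDim; infer_instance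

-- ===== CLAIM (what is proved, stated in full; the proofs are below) =====
def Claim_equal_getOutputDim : Prop := ∀ (h_ : Int), Dom_getOutputDim h_ → Spec_getOutputDim h_ (getOutputDim h_)

-- ===== LEMMAS AND PROOFS =====

-- the common value of both programs on every even h
def pvAns : List (Int × Int × Int × Int × Int) :=
  [(0, 0, 1, 2, 2), (0, 0, 2, 1, 2), (0, 0, 2, 2, 1), (0, 1, 0, 2, 2), (0, 1, 1, 1, 2),
   (0, 1, 1, 2, 1), (0, 1, 2, 0, 2), (0, 1, 2, 1, 1), (0, 1, 2, 2, 0), (0, 2, 0, 1, 2),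
   (0, 2, 0, 2, 1), (0, 2, 1, 0, 2), (0, 2, 1, 1, 1), (0, 2, 1, 2, 0), (0, 2, 2, 0, 1),
   (0, 2, 2, 1, 0), (2, 0, 0, 2, 2), (2, 0, 1, 1, 2), (2, 0, 1, 2, 1), (2, 0, 2, 0, 2),
   (2, 0, 2, 1, 1), (2, 0, 2, 2, 0), (2, 1, 0, 1, 2), (2, 1, 0, 2, 1), (2, 1, 1, 0, 2),
   (2, 1, 1, 1, 1), (2, 1, 1, 2, 0), (2, 1, 2, 0, 1), (2, 1, 2, 1, 0), (2, 2, 0, 0, 2),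
   (2, 2, 0, 1, 1), (2, 2, 0, 2, 0), (2, 2, 1, 0, 1), (2, 2, 1, 1, 0), (2, 2, 2, 0, 0)]

theorem pv_fd1 (a : Int) : PySem.Int.floordiv a 1 = a := by
  rw [PySem.Int.floordiv_eq_ediv_of_pos (by norm_num)]; omega

theorem pv_fdgen (q i : Int) : PySem.Int.floordiv (2*q - 5 + 2*i) 2 = q + i - 3 := by
  rw [PySem.Int.floordiv_eq_ediv_of_pos (by norm_num)]; omega

theorem pv_fd2even (q : Int) : PySem.Int.floordiv (2*q) 2 = q := by
  rw [PySem.Int.floordiv_eq_ediv_of_pos (by norm_num)]; omega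

theorem pv_mod2_even (q : Int) : PySem.Int.mod (2*q) 2 = 0 := by
  rw [PySem.Int.mod_eq_emod_of_pos (by norm_num)]; omega

theorem pv_pyR3 : PySem.List.pyRange 0 3 1 = [0, 1, 2] := by decide

theorem pv_condA_even (q i j k l m : Int) :
    (PySem.Int.mod (2*q) 2 == 0 &&
      (computeOutDim (computeOutDim (computeOutDim (computeOutDim (computeOutDim (2*q) 5 i 2) 3 j 1) 3 k 1) 3 l 1) 3 m 1
        == PySem.Int.floordiv (2*q) 2))
    = decide (i + 2*(j + k + l + m) = 10) := by
  rw [Bool.eq_iff_iff]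
  simp only [Bool.and_eq_true, beq_iff_eq, decide_eq_true_eq, computeOutDim,
    pv_fd1, pv_fdgen, pv_fd2even, pv_mod2_even, true_and]
  constructor <;> intro hX <;> omega

theorem pv_condB0 (q i : Int) : q - (q + i - 3 + 1) + 8 = 10 - i := by ring

set_option maxRecDepth 10000 in
theorem pv_A_even (q : Int) : getOutputDim (2*q) = pvAns := by
  simp only [getOutputDim, pv_condA_even]
  decide

theorem pv_A_odd (q : Int) : getOutputDim (2*q+1) = [] := by
  simp [getOutputDim, pv_pyR3]

set_option maxRecDepth 10000 in
theorem pv_B_even (q : Int) : getOutputDim_alt (2*q) = pvAns := by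
  simp only [getOutputDim_alt, pv_mod2_even, pv_fd2even, pv_fdgen, pv_condB0,
    ne_eq, not_true_eq_false, if_false]
  decide

theorem pv_B_odd (q : Int) : getOutputDim_alt (2*q+1) = [] := by
  simp [getOutputDim_alt]

-- ===== VERDICT (by name: the statement is the Claim_ definition above) =====
theorem getOutputDim_spec : Claim_equal_getOutputDim := by
  intro h _
  unfold Spec_getOutputDim
  rcases Int.even_or_odd h with ⟨q, rfl⟩ | ⟨q, rfl⟩
  · rw [show q + q = 2*q by ring, pv_A_even, pv_B_even]
  · rw [pv_A_odd, pv_B_odd]
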